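-- pv_equiv track=rewrite | github.com/aljica/spraktek | assignment-1/Aligner/Aligner.py | compute_backpointers
-- ===== SOURCE A (Python) =====
-- def compute_backpointers(s0, s1):
--     """
--     <p>Computes and returns the backpointer array (see Jurafsky and Martin, Fig 3.27)
--     arising from the calculation of the minimal edit distance of two strings
--     <code>s0</code> and <code>s1</code>.</p>
--
--     <p>The backpointer array has three dimensions. The first two are the row and
--     column indices of the table in Fig 3.27. The third dimension either has
--     the value 0 (in which case the value is the row index of the cell the backpointer
--     is pointing to), or the value 1 (the value is the column index). For example, if
--     the backpointer from cell (5,5) is to cell (5,4), then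
--     <code>backptr[5][5][0]=5</code> and <code>backptr[5][5][1]=4</code>.</p>
--
--     :param s0: The first string.
--     :param s1: The second string.
--     :return: The backpointer array.
--     """
--     if s0 == None or s1 == None:
--         raise Exception('Both s0 and s1 have to be set')
--
--     backptr = [[[0, 0] for y in range(len(s1)+1)] for x in range(len(s0)+1)]
--
--     # YOUR CODE HERE
--     D = [[[0] for y in range(len(s1)+1)] for x in range(len(s0)+1)] # Distance matrix
--
--     # Basic setup
--     # First row, all columns
--     for k in range(len(s1) + 1):
--         D[0][k][0] = k
--         if k == 0:
--             continue
--         backptr[0][k][0], backptr[0][k][1] = 0, k-1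
--     # First column, all rows
--     for k in range(len(s0) + 1):
--         D[k][0][0] = k
--         if k == 0:
--             continue
--         backptr[k][0][0], backptr[k][0][1] = k-1, 0
--
--     # Loop through both strings (inner part of matrix, i.e. excluding first column and first row)
--     for i in range(1, len(s0)+1):
--         for j in range(1, len(s1)+1):
--             left_cost = D[i][j-1][0] + 1 # Cost to come from the left
--             below_cost = D[i-1][j][0] + 1 # Cost to come from below
--             # Cost to come from diagonally behind
--             diag_cost = D[i-1][j-1][0]
--             if (s0[i-1] != s1[j-1]):
--                 diag_cost += 2
--
--             # Check which cost is cheapest (preference for diag_cost)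
--             if ((left_cost < below_cost) and (left_cost < diag_cost)):
--                 # We should come from the left in our backtrace matrix
--                 D[i][j][0] = left_cost
--                 backptr[i][j][0], backptr[i][j][1] = i, j-1
--             elif ((below_cost <= left_cost) and (below_cost < diag_cost)):
--                 # We should come from below
--                 D[i][j][0] = below_cost
--                 backptr[i][j][0], backptr[i][j][1] = i-1, j
--             elif ((diag_cost <= left_cost) and (diag_cost <= below_cost)):
--                 # We should come from diagonally behind
--                 D[i][j][0] = diag_cost
--                 backptr[i][j][0], backptr[i][j][1] = i-1, j-1
--
--     return backptr
-- ===== SOURCE B (Python) =====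
-- def compute_backpointers(s0, s1):
--     if s0 == None or s1 == None:
--         raise Exception('Both s0 and s1 have to be set')
--     n, m = len(s0), len(s1)
--
--     # Pass 1: classic edit-distance matrix of plain ints.
--     D = [[0] * (m + 1) for _ in range(n + 1)]
--     for j in range(m + 1):
--         D[0][j] = j
--     for i in range(n + 1):
--         D[i][0] = i
--     for i in range(1, n + 1):
--         for j in range(1, m + 1):
--             D[i][j] = min(min(D[i][j - 1] + 1, D[i - 1][j] + 1),
--                           D[i - 1][j - 1] + (0 if s0[i - 1] == s1[j - 1] else 2))
--
--     # Pass 2: derive each backpointer from the finished matrix.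
--     def ptr(i, j):
--         if i == 0 and j == 0:
--             return [0, 0]
--         if i == 0:
--             return [0, j - 1]
--         if j == 0:
--             return [i - 1, 0]
--         left = D[i][j - 1] + 1
--         below = D[i - 1][j] + 1
--         diag = D[i - 1][j - 1] + (0 if s0[i - 1] == s1[j - 1] else 2)
--         if left < below and left < diag:
--             return [i, j - 1]
--         if below <= left and below < diag:
--             return [i - 1, j]
--         return [i - 1, j - 1]
--
--     return [[ptr(i, j) for j in range(m + 1)] for i in range(n + 1)]
-- ===== Notes on version B (the rewrite author's own statement) =====
-- stated objective: alternative
-- what changed: B separates the computation into two passes: it first fills a plain-int distance matrix with min() (instead of A's interleaved branch chain over singleton-list cells) and then derives every backpointer in a second pass from the finished matrix, building the result by nested comprehension instead of mutating a preallocated 3-D array.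
import Mathlib
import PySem

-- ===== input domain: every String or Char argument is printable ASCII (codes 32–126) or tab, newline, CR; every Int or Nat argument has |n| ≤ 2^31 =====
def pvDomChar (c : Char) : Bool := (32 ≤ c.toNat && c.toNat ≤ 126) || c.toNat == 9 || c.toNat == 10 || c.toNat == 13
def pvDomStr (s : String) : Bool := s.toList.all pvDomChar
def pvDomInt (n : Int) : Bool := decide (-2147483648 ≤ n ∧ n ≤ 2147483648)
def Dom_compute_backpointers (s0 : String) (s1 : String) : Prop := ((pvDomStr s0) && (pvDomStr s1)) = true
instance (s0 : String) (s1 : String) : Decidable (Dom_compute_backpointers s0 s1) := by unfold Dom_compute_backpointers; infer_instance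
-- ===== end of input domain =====

-- B computes the distance matrix with plain ints and min() in a first pass and derives every
-- backpointer from the finished matrix in a second pass (objective: alternative decomposition).
-- A's `s0 == None` check cannot fire for String inputs, so both ports are total.

-- matrix cell read: mat[i][j] with an in-range index (both Pythons only index in range)
def pvMget {α : Type} (mat : List (List α)) (i j : Nat) (d : α) : α := (mat.getD i []).getD j d
-- matrix cell write: mat[i][j] = v
def pvMset {α : Type} (mat : List (List α)) (i j : Nat) (v : α) : List (List α) :=
  mat.set i ((mat.getD i []).set j v)

-- ===== PORT A =====
-- body of A's first-row loop (k-th iteration): D[0][k][0] = k; if k != 0: backptr[0][k] = [0, k-1]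
def pvARow0 (st : List (List (List Int)) × List (List (List Int))) (k : Nat) :
    List (List (List Int)) × List (List (List Int)) :=
  let Dm := pvMset st.1 0 k ((pvMget st.1 0 k []).set 0 (k : Int))
  if k = 0 then (Dm, st.2) else (Dm, pvMset st.2 0 k [0, (k : Int) - 1])

-- body of A's first-column loop: D[k][0][0] = k; if k != 0: backptr[k][0] = [k-1, 0]
def pvACol0 (st : List (List (List Int)) × List (List (List Int))) (k : Nat) :
    List (List (List Int)) × List (List (List Int)) :=
  let Dm := pvMset st.1 k 0 ((pvMget st.1 k 0 []).set 0 (k : Int))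
  if k = 0 then (Dm, st.2) else (Dm, pvMset st.2 k 0 [(k : Int) - 1, 0])

-- body of A's main double loop (cell (i, j))
def pvACell (a b : List Char) (i j : Nat)
    (st : List (List (List Int)) × List (List (List Int))) :
    List (List (List Int)) × List (List (List Int)) :=
  let left_cost := (pvMget st.1 i (j-1) []).getD 0 0 + 1
  let below_cost := (pvMget st.1 (i-1) j []).getD 0 0 + 1
  let diag0 := (pvMget st.1 (i-1) (j-1) []).getD 0 0
  let diag_cost := if a.getD (i-1) ' ' ≠ b.getD (j-1) ' ' then diag0 + 2 else diag0
  if left_cost < below_cost ∧ left_cost < diag_cost then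
    (pvMset st.1 i j ((pvMget st.1 i j []).set 0 left_cost),
     pvMset st.2 i j [(i : Int), (j : Int) - 1])
  else if below_cost ≤ left_cost ∧ below_cost < diag_cost then
    (pvMset st.1 i j ((pvMget st.1 i j []).set 0 below_cost),
     pvMset st.2 i j [(i : Int) - 1, (j : Int)])
  else if diag_cost ≤ left_cost ∧ diag_cost ≤ below_cost then
    (pvMset st.1 i j ((pvMget st.1 i j []).set 0 diag_cost),
     pvMset st.2 i j [(i : Int) - 1, (j : Int) - 1])
  else st

def compute_backpointers (s0 : String) (s1 : String) : List (List (List Int)) :=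
  let a := s0.toList
  let b := s1.toList
  let n := a.length
  let m := b.length
  -- backptr = [[[0, 0] for y in range(len(s1)+1)] for x in range(len(s0)+1)]
  let backptr0 : List (List (List Int)) :=
    (List.range (n+1)).map (fun _ => (List.range (m+1)).map (fun _ => ([0, 0] : List Int)))
  -- D = [[[0] for y in range(len(s1)+1)] for x in range(len(s0)+1)]
  let D0 : List (List (List Int)) :=
    (List.range (n+1)).map (fun _ => (List.range (m+1)).map (fun _ => ([0] : List Int)))
  let st1 := (List.range (m+1)).foldl pvARow0 (D0, backptr0)
  let st2 := (List.range (n+1)).foldl pvACol0 st1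
  let stF := (List.range' 1 n).foldl (fun st i =>
    (List.range' 1 m).foldl (fun st j => pvACell a b i j st) st) st2
  stF.2

-- ===== PORT B =====
-- body of B's main double loop: D[i][j] = min(min(left, below), diag)
def pvBCell (a b : List Char) (i j : Nat) (Dm : List (List Int)) : List (List Int) :=
  pvMset Dm i j (min (min (pvMget Dm i (j-1) 0 + 1) (pvMget Dm (i-1) j 0 + 1))
    (pvMget Dm (i-1) (j-1) 0 + (if a.getD (i-1) ' ' = b.getD (j-1) ' ' then 0 else 2)))

-- B's helper ptr(i, j): derive one backpointer from the finished distance matrix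
def pvPtrB (a b : List Char) (Dm : List (List Int)) (i j : Nat) : List Int :=
  if i = 0 ∧ j = 0 then [0, 0]
  else if i = 0 then [0, (j : Int) - 1]
  else if j = 0 then [(i : Int) - 1, 0]
  else
    let left := pvMget Dm i (j-1) 0 + 1
    let below := pvMget Dm (i-1) j 0 + 1
    let diag := pvMget Dm (i-1) (j-1) 0 + (if a.getD (i-1) ' ' = b.getD (j-1) ' ' then 0 else 2)
    if left < below ∧ left < diag then [(i : Int), (j : Int) - 1]
    else if below ≤ left ∧ below < diag then [(i : Int) - 1, (j : Int)]
    else [(i : Int) - 1, (j : Int) - 1]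

def compute_backpointers_alt (s0 : String) (s1 : String) : List (List (List Int)) :=
  let a := s0.toList
  let b := s1.toList
  let n := a.length
  let m := b.length
  -- D = [[0] * (m+1) for _ in range(n+1)]
  let D0 : List (List Int) := (List.range (n+1)).map (fun _ => List.replicate (m+1) (0 : Int))
  let D1 := (List.range (m+1)).foldl (fun Dm j => pvMset Dm 0 j (j : Int)) D0
  let D2 := (List.range (n+1)).foldl (fun Dm i => pvMset Dm i 0 (i : Int)) D1
  let DF := (List.range' 1 n).foldl (fun Dm i =>
    (List.range' 1 m).foldl (fun Dm j => pvBCell a b i j Dm) Dm) D2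
  (List.range (n+1)).map (fun i => (List.range (m+1)).map (fun j => pvPtrB a b DF i j))

-- ===== PRECONDITION & SPEC =====
def Spec_compute_backpointers (s0 : String) (s1 : String) (out : List (List (List Int))) : Prop := out = compute_backpointers_alt s0 s1
instance (s0 : String) (s1 : String) (out : List (List (List Int))) : Decidable (Spec_compute_backpointers s0 s1 out) := by unfold Spec_compute_backpointers; infer_instance

-- ===== CLAIM (what is proved, stated in full; the proofs are below) =====
def Claim_equal_compute_backpointers : Prop := ∀ (s0 : String) (s1 : String), Dom_compute_backpointers s0 s1 → Spec_compute_backpointers s0 s1 (compute_backpointers s0 s1)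

-- ===== LEMMAS AND PROOFS =====

-- the edit distance both programs tabulate, with A's exact tie-break chain
def pvDist (a b : List Char) : Nat → Nat → Int
  | 0, j => (j : Int)
  | i+1, 0 => ((i : Int) + 1)
  | i+1, j+1 =>
    let L := pvDist a b (i+1) j + 1
    let Bc := pvDist a b i (j+1) + 1
    let Dg := pvDist a b i j + (if a.getD i ' ' = b.getD j ' ' then 0 else 2)
    if L < Bc ∧ L < Dg then L else if Bc ≤ L ∧ Bc < Dg then Bc else Dg
  termination_by i j => (i, j)

-- the backpointer both programs produce at cell (i, j)
def pvPtr (a b : List Char) : Nat → Nat → List Int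
  | 0, 0 => [0, 0]
  | 0, j+1 => [0, (j : Int)]
  | i+1, 0 => [(i : Int), 0]
  | i+1, j+1 =>
    let L := pvDist a b (i+1) j + 1
    let Bc := pvDist a b i (j+1) + 1
    let Dg := pvDist a b i j + (if a.getD i ' ' = b.getD j ' ' then 0 else 2)
    if L < Bc ∧ L < Dg then [(i : Int) + 1, (j : Int)]
    else if Bc ≤ L ∧ Bc < Dg then [(i : Int), (j : Int) + 1]
    else [(i : Int), (j : Int)]

theorem pvDist_zero_left (a b : List Char) (j : Nat) : pvDist a b 0 j = (j : Int) := by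
  cases j <;> simp [pvDist]

theorem pvDist_zero_right (a b : List Char) (i : Nat) : pvDist a b i 0 = (i : Int) := by
  cases i <;> simp [pvDist]

theorem pvDist_min (a b : List Char) (i j : Nat) :
    pvDist a b (i+1) (j+1) =
      min (min (pvDist a b (i+1) j + 1) (pvDist a b i (j+1) + 1))
        (pvDist a b i j + (if a.getD i ' ' = b.getD j ' ' then 0 else 2)) := by
  rw [pvDist]
  by_cases hc : a.getD i ' ' = b.getD j ' ' <;>
    simp only [hc, if_pos, min_def] <;>
    split_ifs <;> omega

theorem getD_set_ite {α : Type} (l : List α) (i : Nat) (v : α) (j : Nat) (d : α) :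
    (l.set i v).getD j d = if j = i ∧ i < l.length then v else l.getD j d := by
  simp only [List.getD, List.getElem?_set]
  by_cases h : i = j <;> by_cases h2 : i < l.length
  · subst h; simp [h2]
  · subst h; rw [if_pos rfl, if_neg h2, if_neg (by simp [h2]), List.getElem?_eq_none (by omega)]
  · rw [if_neg h, if_neg (fun hc => h hc.1.symm)]
  · rw [if_neg h, if_neg (fun hc => h hc.1.symm)]

theorem getD_map_range' {α : Type} (n : Nat) (f : Nat → α) (i : Nat) (hi : i < n) (d : α) :
    ((List.range n).map f).getD i d = f i := by
  rw [List.getD_eq_getElem?_getD]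
  simp [List.getElem?_map, List.getElem?_range hi]

-- invariant: M is an (n+1) × (m+1) matrix whose cell (i, j) holds f i j
def GoodM {α : Type} (n m : Nat) (d : α) (f : Nat → Nat → α) (M : List (List α)) : Prop :=
  M.length = n+1 ∧ (∀ i, i < n+1 → (M.getD i []).length = m+1) ∧
  (∀ i, i < n+1 → ∀ j, j < m+1 → pvMget M i j d = f i j)

theorem GoodM_congr {α : Type} {n m : Nat} {d : α} {f g : Nat → Nat → α} {M : List (List α)}
    (h : GoodM n m d f M) (hfg : ∀ i, i < n+1 → ∀ j, j < m+1 → f i j = g i j) :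
    GoodM n m d g M :=
  ⟨h.1, h.2.1, fun i hi j hj => (h.2.2 i hi j hj).trans (hfg i hi j hj)⟩

theorem GoodM_mset {α : Type} {n m : Nat} {d : α} {f : Nat → Nat → α} {M : List (List α)}
    (h : GoodM n m d f M) {i j : Nat} (hi : i < n+1) (hj : j < m+1) (v : α) :
    GoodM n m d (fun i' j' => if i' = i ∧ j' = j then v else f i' j') (pvMset M i j v) := by
  obtain ⟨hlen, hrow, hval⟩ := h
  refine ⟨by simp [pvMset, hlen], ?_, ?_⟩
  · intro i' hi'
    unfold pvMset
    rw [getD_set_ite]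
    split_ifs with hc
    · rw [List.length_set]; exact hrow i hi
    · exact hrow i' hi'
  · intro i' hi' j' hj'
    show pvMget (pvMset M i j v) i' j' d = if i' = i ∧ j' = j then v else f i' j'
    have hlr : (M.getD i []).length = m+1 := hrow i hi
    have hML : i < M.length := by omega
    unfold pvMget pvMset
    rw [getD_set_ite]
    by_cases h1 : i' = i
    · rw [if_pos ⟨h1, hML⟩, getD_set_ite, hlr]
      by_cases h2 : j' = j
      · rw [if_pos ⟨h2, by omega⟩, if_pos ⟨h1, h2⟩]
      · rw [if_neg (fun hx => h2 hx.1), if_neg (fun hx => h2 hx.2), h1]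
        exact hval i hi j' hj'
    · rw [if_neg (fun hx => h1 hx.1), if_neg (fun hx => h1 hx.1)]
      exact hval i' hi' j' hj'

theorem GoodM_init {α : Type} (n m : Nat) (d c : α) :
    GoodM n m d (fun _ _ => c) ((List.range (n+1)).map (fun _ => (List.range (m+1)).map (fun _ => c))) := by
  refine ⟨by simp, ?_, ?_⟩
  · intro i hi; rw [getD_map_range' _ _ _ hi]; simp
  · intro i hi j hj
    unfold pvMget
    rw [getD_map_range' _ _ _ hi, getD_map_range' _ _ _ hj]

theorem GoodM_init_replicate {α : Type} (n m : Nat) (d c : α) :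
    GoodM n m d (fun _ _ => c) ((List.range (n+1)).map (fun _ => List.replicate (m+1) c)) := by
  refine ⟨by simp, ?_, ?_⟩
  · intro i hi; rw [getD_map_range' _ _ _ hi]; simp
  · intro i hi j hj
    unfold pvMget
    rw [getD_map_range' _ _ _ hi]
    simp [List.getD, hj]

theorem GoodM_eq_table {α : Type} {n m : Nat} {d : α} {f : Nat → Nat → α} {M : List (List α)}
    (h : GoodM n m d f M) :
    M = (List.range (n+1)).map (fun i => (List.range (m+1)).map (fun j => f i j)) := by
  obtain ⟨hlen, hrow, hval⟩ := h
  apply List.ext_getElem (by simp [hlen])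
  intro i h1 h2
  have hi : i < n+1 := by omega
  have hMi : M.getD i [] = M[i] := List.getD_eq_getElem _ _ h1
  rw [List.getElem_map, List.getElem_range]
  apply List.ext_getElem (by rw [← hMi]; simpa using hrow i hi)
  intro j hj1 hj2
  have hjm : j < m+1 := by simpa using hj2
  have hv := hval i hi j hjm
  unfold pvMget at hv
  rw [hMi] at hv
  rw [List.getElem_map, List.getElem_range, ← hv, List.getD_eq_getElem _ _ hj1]


-- progress function for the main fill: rows < i done, row i done up to column q
def pvValB (a b : List Char) (i q i' j' : Nat) : Int :=
  if i' = 0 then (j' : Int) else if j' = 0 then (i' : Int)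
  else if i' < i ∨ (i' = i ∧ j' ≤ q) then pvDist a b i' j' else 0

theorem pvValB_done (a b : List Char) {i q i' j' : Nat}
    (h : i' = 0 ∨ j' = 0 ∨ i' < i ∨ (i' = i ∧ j' ≤ q)) :
    pvValB a b i q i' j' = pvDist a b i' j' := by
  unfold pvValB
  split_ifs with h1 h2 h3
  · rw [h1, pvDist_zero_left]
  · rw [h2, pvDist_zero_right]
  · rfl
  · omega

theorem bRow0 (n m : Nat) (M : List (List Int)) (h : GoodM n m 0 (fun _ _ => 0) M)
    (t : Nat) (ht : t ≤ m+1) :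
    GoodM n m 0 (fun i j => if i = 0 ∧ j < t then (j : Int) else 0)
      ((List.range t).foldl (fun Dm j => pvMset Dm 0 j (j : Int)) M) := by
  induction t with
  | zero => exact GoodM_congr h (by intro i _ j _; simp)
  | succ t ih =>
    rw [List.range_succ, List.foldl_append, List.foldl_cons, List.foldl_nil]
    refine GoodM_congr (GoodM_mset (ih (by omega)) (by omega) (show t < m+1 by omega) (t : Int)) ?_
    intro i _ j _
    split_ifs <;> omega

theorem bCol0 (n m : Nat) (M : List (List Int))
    (h : GoodM n m 0 (fun i j => if i = 0 ∧ j < m+1 then (j : Int) else 0) M)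
    (t : Nat) (ht : t ≤ n+1) :
    GoodM n m 0 (fun i j => if j = 0 ∧ i < t then (i : Int) else if i = 0 then (j : Int) else 0)
      ((List.range t).foldl (fun Dm i => pvMset Dm i 0 (i : Int)) M) := by
  induction t with
  | zero => exact GoodM_congr h (by intro i hi j hj; simp; split_ifs <;> omega)
  | succ t ih =>
    rw [List.range_succ, List.foldl_append, List.foldl_cons, List.foldl_nil]
    refine GoodM_congr (GoodM_mset (ih (by omega)) (show t < n+1 by omega) (by omega) (t : Int)) ?_
    intro i _ j _
    split_ifs <;> omega

theorem bInner (a b : List Char) (n m : Nat) (i0 : Nat) (hi : i0 + 1 ≤ n)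
    (M : List (List Int)) (h : GoodM n m 0 (pvValB a b (i0+1) 0) M)
    (q : Nat) (hq : q ≤ m) :
    GoodM n m 0 (pvValB a b (i0+1) q)
      ((List.range' 1 q).foldl (fun Dm j => pvBCell a b (i0+1) j Dm) M) := by
  induction q with
  | zero => exact h
  | succ q ih =>
    rw [List.range'_1_concat, List.foldl_append, List.foldl_cons, List.foldl_nil]
    rw [show 1 + q = q + 1 from by omega]
    have hG := ih (by omega)
    have hget : ∀ i' j', i' < n+1 → j' < m+1 →
        (i' = 0 ∨ j' = 0 ∨ i' < i0+1 ∨ (i' = i0+1 ∧ j' ≤ q)) →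
        pvMget ((List.range' 1 q).foldl (fun Dm j => pvBCell a b (i0+1) j Dm) M) i' j' 0
          = pvDist a b i' j' := by
      intro i' j' h1 h2 h3
      rw [hG.2.2 i' h1 j' h2, pvValB_done a b h3]
    rw [pvBCell]
    rw [show (q+1) - 1 = q from by omega, show (i0+1) - 1 = i0 from by omega]
    rw [hget (i0+1) q (by omega) (by omega) (by omega),
        hget i0 (q+1) (by omega) (by omega) (by omega),
        hget i0 q (by omega) (by omega) (by omega)]
    rw [← pvDist_min]
    refine GoodM_congr (GoodM_mset hG (by omega) (by omega) _) ?_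
    intro i' _ j' _
    by_cases hc : i' = i0+1 ∧ j' = q+1
    · rw [if_pos hc, hc.1, hc.2, pvValB_done a b (by omega)]
    · rw [if_neg hc]
      unfold pvValB
      split_ifs <;> first | rfl | omega

theorem bOuter (a b : List Char) (n m : Nat) (M : List (List Int))
    (h : GoodM n m 0 (pvValB a b 1 0) M) (p : Nat) (hp : p ≤ n) :
    GoodM n m 0 (pvValB a b (p+1) 0)
      ((List.range' 1 p).foldl (fun Dm i =>
        (List.range' 1 m).foldl (fun Dm j => pvBCell a b i j Dm) Dm) M) := by
  induction p with
  | zero => exact h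
  | succ p ih =>
    rw [List.range'_1_concat, List.foldl_append, List.foldl_cons, List.foldl_nil]
    rw [show 1 + p = p + 1 from by omega]
    refine GoodM_congr (bInner a b n m p (by omega) _ (ih (by omega)) m le_rfl) ?_
    intro i' _ j' hj'
    unfold pvValB
    split_ifs <;> first | rfl | omega


theorem ptrB_eq (a b : List Char) (n m : Nat) (DF : List (List Int))
    (hD : GoodM n m 0 (pvDist a b) DF) (i j : Nat) (hi : i < n+1) (hj : j < m+1) :
    pvPtrB a b DF i j = pvPtr a b i j := by
  match i, j with
  | 0, 0 => simp [pvPtrB, pvPtr]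
  | 0, j+1 =>
    simp only [pvPtrB, pvPtr]
    norm_num
  | i+1, 0 =>
    simp only [pvPtrB, pvPtr]
    norm_num
  | i+1, j+1 =>
    have h1 := hD.2.2 (i+1) (by omega) ((j+1)-1) (by omega)
    have h2 := hD.2.2 ((i+1)-1) (by omega) (j+1) (by omega)
    have h3 := hD.2.2 ((i+1)-1) (by omega) ((j+1)-1) (by omega)
    unfold pvPtrB
    rw [if_neg (by omega), if_neg (by omega), if_neg (by omega), h1, h2, h3]
    rw [show (i+1)-1 = i from rfl, show (j+1)-1 = j from rfl, pvPtr]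
    simp only []
    split_ifs <;> simp

theorem B_table (s0 s1 : String) :
    compute_backpointers_alt s0 s1 =
      (List.range (s0.toList.length+1)).map (fun i =>
        (List.range (s1.toList.length+1)).map (fun j => pvPtr s0.toList s1.toList i j)) := by
  simp only [compute_backpointers_alt]
  refine List.map_congr_left ?_
  intro i hi
  refine List.map_congr_left ?_
  intro j hj
  have hi' : i < s0.toList.length + 1 := List.mem_range.mp hi
  have hj' : j < s1.toList.length + 1 := List.mem_range.mp hj
  refine ptrB_eq _ _ _ _ _ ?_ i j hi' hj'
  have h0 := GoodM_init_replicate s0.toList.length s1.toList.length (0 : Int) (0 : Int)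
  have h1 := bRow0 s0.toList.length s1.toList.length _ h0 (s1.toList.length+1) le_rfl
  have h2 := bCol0 s0.toList.length s1.toList.length _ h1 (s0.toList.length+1) le_rfl
  have h3 : GoodM s0.toList.length s1.toList.length 0 (pvValB s0.toList s1.toList 1 0) _ :=
    GoodM_congr h2 (by
      intro i hi j hj
      unfold pvValB
      split_ifs <;> omega)
  have h4 := bOuter s0.toList s1.toList s0.toList.length s1.toList.length _ h3
    s0.toList.length le_rfl
  exact GoodM_congr h4 (fun i hi j hj => pvValB_done s0.toList s1.toList (by omega))


-- A-side: backpointer progress function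
def pvValP (a b : List Char) (i q i' j' : Nat) : List Int :=
  if i' = 0 ∨ j' = 0 ∨ i' < i ∨ (i' = i ∧ j' ≤ q) then pvPtr a b i' j' else [0, 0]

theorem pvPtr_row0 (a b : List Char) (k : Nat) (hk : 1 ≤ k) :
    pvPtr a b 0 k = [0, (k : Int) - 1] := by
  obtain ⟨k0, rfl⟩ : ∃ k0, k = k0 + 1 := ⟨k - 1, by omega⟩
  simp [pvPtr]

theorem pvPtr_col0 (a b : List Char) (k : Nat) (hk : 1 ≤ k) :
    pvPtr a b k 0 = [(k : Int) - 1, 0] := by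
  obtain ⟨k0, rfl⟩ : ∃ k0, k = k0 + 1 := ⟨k - 1, by omega⟩
  simp [pvPtr]

theorem GoodM_mset_single {n m : Nat} {g : Nat → Nat → Int} {M : List (List (List Int))}
    (h : GoodM n m ([] : List Int) (fun i j => [g i j]) M) {i j : Nat}
    (hi : i < n+1) (hj : j < m+1) (v : Int) :
    GoodM n m [] (fun i' j' => [if i' = i ∧ j' = j then v else g i' j']) (pvMset M i j [v]) := by
  refine GoodM_congr (GoodM_mset h hi hj [v]) ?_
  intro i' _ j' _
  split_ifs <;> rfl

theorem pvARow0_fst (st : List (List (List Int)) × List (List (List Int))) (k : Nat) :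
    (pvARow0 st k).1 = pvMset st.1 0 k ((pvMget st.1 0 k []).set 0 (k : Int)) := by
  unfold pvARow0; split_ifs <;> rfl

theorem pvARow0_snd_zero (st : List (List (List Int)) × List (List (List Int))) :
    (pvARow0 st 0).2 = st.2 := rfl

theorem pvARow0_snd_pos (st : List (List (List Int)) × List (List (List Int))) (k : Nat)
    (hk : k ≠ 0) : (pvARow0 st k).2 = pvMset st.2 0 k [0, (k : Int) - 1] := by
  unfold pvARow0; rw [if_neg hk]

theorem pvACol0_fst (st : List (List (List Int)) × List (List (List Int))) (k : Nat) :
    (pvACol0 st k).1 = pvMset st.1 k 0 ((pvMget st.1 k 0 []).set 0 (k : Int)) := by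
  unfold pvACol0; split_ifs <;> rfl

theorem pvACol0_snd_zero (st : List (List (List Int)) × List (List (List Int))) :
    (pvACol0 st 0).2 = st.2 := rfl

theorem pvACol0_snd_pos (st : List (List (List Int)) × List (List (List Int))) (k : Nat)
    (hk : k ≠ 0) : (pvACol0 st k).2 = pvMset st.2 k 0 [(k : Int) - 1, 0] := by
  unfold pvACol0; rw [if_neg hk]

theorem aRow0 (a b : List Char) (n m : Nat)
    (st : List (List (List Int)) × List (List (List Int)))
    (hD : GoodM n m ([] : List Int) (fun _ _ => [0]) st.1)
    (hB : GoodM n m ([] : List Int) (fun _ _ => [0, 0]) st.2)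
    (t : Nat) (ht : t ≤ m+1) :
    GoodM n m [] (fun i j => [if i = 0 ∧ j < t then (j : Int) else 0])
      ((List.range t).foldl pvARow0 st).1 ∧
    GoodM n m [] (fun i j => if i = 0 ∧ 1 ≤ j ∧ j < t then pvPtr a b i j else [0, 0])
      ((List.range t).foldl pvARow0 st).2 := by
  induction t with
  | zero =>
    refine ⟨GoodM_congr hD ?_, GoodM_congr hB ?_⟩ <;> (intro i _ j _; simp)
  | succ t ih =>
    obtain ⟨ihD, ihB⟩ := ih (by omega)
    rw [List.range_succ, List.foldl_append, List.foldl_cons, List.foldl_nil]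
    have hcell := ihD.2.2 0 (by omega) t (by omega)
    constructor
    · rw [pvARow0_fst, hcell]
      refine GoodM_congr (GoodM_mset_single ihD (by omega) (by omega) (t : Int)) ?_
      intro i' _ j' _
      refine congrArg (fun z => [z]) ?_
      split_ifs <;> omega
    · by_cases ht0 : t = 0
      · subst ht0
        rw [pvARow0_snd_zero]
        refine GoodM_congr ihB ?_
        intro i' _ j' _
        split_ifs <;> first | rfl | omega
      · rw [pvARow0_snd_pos _ _ ht0]
        refine GoodM_congr (GoodM_mset (i := 0) (j := t) ihB (by omega) (by omega) _) ?_
        intro i' _ j' _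
        by_cases hc : i' = 0 ∧ j' = t
        · rw [if_pos hc, if_pos (by omega), hc.1, hc.2, pvPtr_row0 a b t (by omega)]
        · rw [if_neg hc]
          split_ifs <;> first | rfl | omega

theorem aCol0 (a b : List Char) (n m : Nat)
    (st : List (List (List Int)) × List (List (List Int)))
    (hD : GoodM n m ([] : List Int) (fun i j => [if i = 0 ∧ j < m+1 then (j : Int) else 0]) st.1)
    (hB : GoodM n m ([] : List Int)
      (fun i j => if i = 0 ∧ 1 ≤ j ∧ j < m+1 then pvPtr a b i j else [0, 0]) st.2)
    (t : Nat) (ht : t ≤ n+1) :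
    GoodM n m [] (fun i j => [if j = 0 ∧ i < t then (i : Int)
        else if i = 0 ∧ j < m+1 then (j : Int) else 0])
      ((List.range t).foldl pvACol0 st).1 ∧
    GoodM n m [] (fun i j => if j = 0 ∧ 1 ≤ i ∧ i < t then pvPtr a b i j
        else if i = 0 ∧ 1 ≤ j ∧ j < m+1 then pvPtr a b i j else [0, 0])
      ((List.range t).foldl pvACol0 st).2 := by
  induction t with
  | zero =>
    refine ⟨GoodM_congr hD ?_, GoodM_congr hB ?_⟩ <;>
      (intro i _ j _; split_ifs <;> first | rfl | omega)
  | succ t ih =>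
    obtain ⟨ihD, ihB⟩ := ih (by omega)
    rw [List.range_succ, List.foldl_append, List.foldl_cons, List.foldl_nil]
    have hcell := ihD.2.2 t (by omega) 0 (by omega)
    constructor
    · rw [pvACol0_fst, hcell]
      refine GoodM_congr (GoodM_mset_single ihD (by omega) (by omega) (t : Int)) ?_
      intro i' _ j' _
      refine congrArg (fun z => [z]) ?_
      split_ifs <;> omega
    · by_cases ht0 : t = 0
      · subst ht0
        rw [pvACol0_snd_zero]
        refine GoodM_congr ihB ?_
        intro i' _ j' _
        split_ifs <;> first | rfl | omega
      · rw [pvACol0_snd_pos _ _ ht0]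
        refine GoodM_congr (GoodM_mset (i := t) (j := 0) ihB (by omega) (by omega) _) ?_
        intro i' _ j' _
        by_cases hc : i' = t ∧ j' = 0
        · rw [if_pos hc, if_pos (by omega), hc.1, hc.2, pvPtr_col0 a b t (by omega)]
        · rw [if_neg hc]
          split_ifs <;> first | rfl | omega


theorem aInner (a b : List Char) (n m : Nat) (i0 : Nat) (hi : i0 + 1 ≤ n)
    (st : List (List (List Int)) × List (List (List Int)))
    (hD : GoodM n m [] (fun i' j' => [pvValB a b (i0+1) 0 i' j']) st.1)
    (hB : GoodM n m [] (pvValP a b (i0+1) 0) st.2)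
    (q : Nat) (hq : q ≤ m) :
    GoodM n m [] (fun i' j' => [pvValB a b (i0+1) q i' j'])
      ((List.range' 1 q).foldl (fun st j => pvACell a b (i0+1) j st) st).1 ∧
    GoodM n m [] (pvValP a b (i0+1) q)
      ((List.range' 1 q).foldl (fun st j => pvACell a b (i0+1) j st) st).2 := by
  induction q with
  | zero => exact ⟨hD, hB⟩
  | succ q ih =>
    obtain ⟨ihD, ihB⟩ := ih (by omega)
    rw [List.range'_1_concat, List.foldl_append, List.foldl_cons, List.foldl_nil]
    rw [show 1 + q = q + 1 from by omega]
    generalize hP : (List.range' 1 q).foldl (fun st j => pvACell a b (i0+1) j st) st = P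
      at ihD ihB ⊢
    have e1 : pvMget P.1 (i0+1) ((q+1)-1) [] = [pvDist a b (i0+1) q] := by
      rw [show (q+1)-1 = q from rfl, ihD.2.2 (i0+1) (by omega) q (by omega)]
      exact congrArg (fun z => [z]) (pvValB_done a b (by omega))
    have e2 : pvMget P.1 ((i0+1)-1) (q+1) [] = [pvDist a b i0 (q+1)] := by
      rw [show (i0+1)-1 = i0 from rfl, ihD.2.2 i0 (by omega) (q+1) (by omega)]
      exact congrArg (fun z => [z]) (pvValB_done a b (by omega))
    have e3 : pvMget P.1 ((i0+1)-1) ((q+1)-1) [] = [pvDist a b i0 q] := by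
      rw [show (i0+1)-1 = i0 from rfl, show (q+1)-1 = q from rfl,
          ihD.2.2 i0 (by omega) q (by omega)]
      exact congrArg (fun z => [z]) (pvValB_done a b (by omega))
    have e4 : pvMget P.1 (i0+1) (q+1) [] = [pvValB a b (i0+1) q (i0+1) (q+1)] :=
      ihD.2.2 (i0+1) (by omega) (q+1) (by omega)
    rw [pvACell, e1, e2, e3, e4]
    simp only [List.getD_cons_zero, show (i0+1)-1 = i0 from rfl, show (q+1)-1 = q from rfl]
    rw [show (if ¬(a.getD i0 ' ' = b.getD q ' ') then pvDist a b i0 q + 2 else pvDist a b i0 q)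
        = pvDist a b i0 q + (if a.getD i0 ' ' = b.getD q ' ' then 0 else 2) from by
      split_ifs <;> omega]
    generalize hg : (if a.getD i0 ' ' = b.getD q ' ' then (0 : Int) else 2) = g
    split_ifs with c1 c2 c3
    · have hval : pvDist a b (i0+1) (q+1) = pvDist a b (i0+1) q + 1 := by
        rw [pvDist]; rw [hg, if_pos c1]
      have hptr : pvPtr a b (i0+1) (q+1) = [((i0+1 : Nat) : Int), ((q+1 : Nat) : Int) - 1] := by
        rw [pvPtr]; rw [hg, if_pos c1]; push_cast; norm_num
      constructor
      · rw [show ([pvValB a b (i0+1) q (i0+1) (q+1)].set 0 (pvDist a b (i0+1) q + 1))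
            = [pvDist a b (i0+1) q + 1] from rfl]
        refine GoodM_congr (GoodM_mset_single (i := i0+1) (j := q+1) ihD (by omega) (by omega) _) ?_
        intro i' _ j' _
        refine congrArg (fun z => [z]) ?_
        by_cases hc2 : i' = i0+1 ∧ j' = q+1
        · rw [if_pos hc2, hc2.1, hc2.2, pvValB_done a b (by omega), hval]
        · rw [if_neg hc2]; unfold pvValB; split_ifs <;> first | rfl | omega
      · refine GoodM_congr (GoodM_mset (i := i0+1) (j := q+1) ihB (by omega) (by omega) _) ?_
        intro i' _ j' _
        by_cases hc2 : i' = i0+1 ∧ j' = q+1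
        · rw [if_pos hc2, hc2.1, hc2.2]
          unfold pvValP
          rw [if_pos (by omega), hptr]
        · rw [if_neg hc2]; unfold pvValP; split_ifs <;> first | rfl | omega
    · have hval : pvDist a b (i0+1) (q+1) = pvDist a b i0 (q+1) + 1 := by
        rw [pvDist]; rw [hg, if_neg c1, if_pos c2]
      have hptr : pvPtr a b (i0+1) (q+1) = [((i0+1 : Nat) : Int) - 1, ((q+1 : Nat) : Int)] := by
        rw [pvPtr]; rw [hg, if_neg c1, if_pos c2]; push_cast; norm_num
      constructor
      · rw [show ([pvValB a b (i0+1) q (i0+1) (q+1)].set 0 (pvDist a b i0 (q+1) + 1))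
            = [pvDist a b i0 (q+1) + 1] from rfl]
        refine GoodM_congr (GoodM_mset_single (i := i0+1) (j := q+1) ihD (by omega) (by omega) _) ?_
        intro i' _ j' _
        refine congrArg (fun z => [z]) ?_
        by_cases hc2 : i' = i0+1 ∧ j' = q+1
        · rw [if_pos hc2, hc2.1, hc2.2, pvValB_done a b (by omega), hval]
        · rw [if_neg hc2]; unfold pvValB; split_ifs <;> first | rfl | omega
      · refine GoodM_congr (GoodM_mset (i := i0+1) (j := q+1) ihB (by omega) (by omega) _) ?_
        intro i' _ j' _
        by_cases hc2 : i' = i0+1 ∧ j' = q+1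
        · rw [if_pos hc2, hc2.1, hc2.2]
          unfold pvValP
          rw [if_pos (by omega), hptr]
        · rw [if_neg hc2]; unfold pvValP; split_ifs <;> first | rfl | omega
    · have hval : pvDist a b (i0+1) (q+1) = pvDist a b i0 q + g := by
        rw [pvDist]; rw [hg, if_neg c1, if_neg c2]
      have hptr : pvPtr a b (i0+1) (q+1)
          = [((i0+1 : Nat) : Int) - 1, ((q+1 : Nat) : Int) - 1] := by
        rw [pvPtr]; rw [hg, if_neg c1, if_neg c2]; push_cast; norm_num
      constructor
      · rw [show ([pvValB a b (i0+1) q (i0+1) (q+1)].set 0 (pvDist a b i0 q + g))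
            = [pvDist a b i0 q + g] from rfl]
        refine GoodM_congr (GoodM_mset_single (i := i0+1) (j := q+1) ihD (by omega) (by omega) _) ?_
        intro i' _ j' _
        refine congrArg (fun z => [z]) ?_
        by_cases hc2 : i' = i0+1 ∧ j' = q+1
        · rw [if_pos hc2, hc2.1, hc2.2, pvValB_done a b (by omega), hval]
        · rw [if_neg hc2]; unfold pvValB; split_ifs <;> first | rfl | omega
      · refine GoodM_congr (GoodM_mset (i := i0+1) (j := q+1) ihB (by omega) (by omega) _) ?_
        intro i' _ j' _
        by_cases hc2 : i' = i0+1 ∧ j' = q+1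
        · rw [if_pos hc2, hc2.1, hc2.2]
          unfold pvValP
          rw [if_pos (by omega), hptr]
        · rw [if_neg hc2]; unfold pvValP; split_ifs <;> first | rfl | omega
    · exact absurd trivial (by omega)

theorem aOuter (a b : List Char) (n m : Nat)
    (st : List (List (List Int)) × List (List (List Int)))
    (hD : GoodM n m [] (fun i' j' => [pvValB a b 1 0 i' j']) st.1)
    (hB : GoodM n m [] (pvValP a b 1 0) st.2)
    (p : Nat) (hp : p ≤ n) :
    GoodM n m [] (fun i' j' => [pvValB a b (p+1) 0 i' j'])
      ((List.range' 1 p).foldl (fun st i =>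
        (List.range' 1 m).foldl (fun st j => pvACell a b i j st) st) st).1 ∧
    GoodM n m [] (pvValP a b (p+1) 0)
      ((List.range' 1 p).foldl (fun st i =>
        (List.range' 1 m).foldl (fun st j => pvACell a b i j st) st) st).2 := by
  induction p with
  | zero => exact ⟨hD, hB⟩
  | succ p ih =>
    obtain ⟨ihD, ihB⟩ := ih (by omega)
    rw [List.range'_1_concat, List.foldl_append, List.foldl_cons, List.foldl_nil]
    rw [show 1 + p = p + 1 from by omega]
    obtain ⟨hD', hB'⟩ := aInner a b n m p (by omega) _ ihD ihB m le_rfl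
    constructor
    · refine GoodM_congr hD' ?_
      intro i' _ j' hj'
      refine congrArg (fun z => [z]) ?_
      unfold pvValB
      split_ifs <;> first | rfl | omega
    · refine GoodM_congr hB' ?_
      intro i' _ j' hj'
      unfold pvValP
      split_ifs <;> first | rfl | omega


theorem A_table (s0 s1 : String) :
    compute_backpointers s0 s1 =
      (List.range (s0.toList.length+1)).map (fun i =>
        (List.range (s1.toList.length+1)).map (fun j => pvPtr s0.toList s1.toList i j)) := by
  simp only [compute_backpointers]
  have h0D := GoodM_init s0.toList.length s1.toList.length ([] : List Int) [0]
  have h0B := GoodM_init s0.toList.length s1.toList.length ([] : List Int) [0, 0]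
  obtain ⟨h1D, h1B⟩ := aRow0 s0.toList s1.toList s0.toList.length s1.toList.length
    ((List.range (s0.toList.length+1)).map (fun _ =>
        (List.range (s1.toList.length+1)).map (fun _ => ([0] : List Int))),
     (List.range (s0.toList.length+1)).map (fun _ =>
        (List.range (s1.toList.length+1)).map (fun _ => ([0, 0] : List Int))))
    h0D h0B (s1.toList.length+1) le_rfl
  obtain ⟨h2D, h2B⟩ := aCol0 s0.toList s1.toList s0.toList.length s1.toList.length
    ((List.range (s1.toList.length+1)).foldl pvARow0
      ((List.range (s0.toList.length+1)).map (fun _ =>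
          (List.range (s1.toList.length+1)).map (fun _ => ([0] : List Int))),
       (List.range (s0.toList.length+1)).map (fun _ =>
          (List.range (s1.toList.length+1)).map (fun _ => ([0, 0] : List Int)))))
    h1D h1B (s0.toList.length+1) le_rfl
  have h3D := GoodM_congr
      (g := fun i' j' => [pvValB s0.toList s1.toList 1 0 i' j']) h2D (by
    intro i _ j _
    refine congrArg (fun z => [z]) ?_
    unfold pvValB
    split_ifs <;> first | rfl | omega)
  have h3B := GoodM_congr (g := pvValP s0.toList s1.toList 1 0) h2B (by
    intro i hi j hj
    unfold pvValP
    by_cases hc : i = 0 ∨ j = 0 ∨ i < 1 ∨ (i = 1 ∧ j ≤ 0)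
    · rw [if_pos hc]
      split_ifs with d1 d2
      · rfl
      · rfl
      · have hi0 : i = 0 := by omega
        have hj0 : j = 0 := by omega
        subst hi0; subst hj0; simp [pvPtr]
    · rw [if_neg hc]
      split_ifs <;> first | rfl | omega)
  obtain ⟨h4D, h4B⟩ := aOuter s0.toList s1.toList s0.toList.length s1.toList.length
    ((List.range (s0.toList.length+1)).foldl pvACol0
      ((List.range (s1.toList.length+1)).foldl pvARow0
        ((List.range (s0.toList.length+1)).map (fun _ =>
            (List.range (s1.toList.length+1)).map (fun _ => ([0] : List Int))),
         (List.range (s0.toList.length+1)).map (fun _ =>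
            (List.range (s1.toList.length+1)).map (fun _ => ([0, 0] : List Int))))))
    h3D h3B s0.toList.length le_rfl
  have hfin := GoodM_congr (g := fun i j => pvPtr s0.toList s1.toList i j) h4B (by
    intro i hi j hj
    unfold pvValP
    rw [if_pos (by omega)])
  exact GoodM_eq_table hfin

-- ===== VERDICT (by name: the statement is the Claim_ definition above) =====
theorem compute_backpointers_spec : Claim_equal_compute_backpointers := by
  intro s0 s1 _
  unfold Spec_compute_backpointers
  rw [A_table, B_table]
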